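-- pv_equiv track=rewrite | github.com/Nacho-Cola/coding-test | 프로그래머스/2/42626. 더 맵게/더 맵게.py | solution
-- ===== SOURCE A (Python) =====
-- import heapq
--
-- def solution(scoville, K):
--     heapq.heapify(scoville)
--     count = 0
--     while True:
--         cur_min = heapq.heappop(scoville)
--         if cur_min < K:
--             nxt_min = heapq.heappop(scoville)
--             heapq.heappush(scoville,cur_min + nxt_min *2)
--         else:
--             break
--         if len(scoville)==1 and scoville[0]<K:
--             return -1
--         count += 1
--     return count
-- ===== SOURCE B (Python) =====
-- from collections import deque
--
-- def solution(scoville, K):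
--     q1 = deque(sorted(scoville))   # the original values, consumed front-to-back
--     q2 = deque()                   # merged values, produced (and proved) in nondecreasing order
--
--     def pop_smallest():
--         if not q2 or (q1 and q1[0] <= q2[0]):
--             return q1.popleft()
--         return q2.popleft()
--
--     count = 0
--     while True:
--         cur = pop_smallest()
--         if cur >= K:
--             return count
--         if not q1 and not q2:
--             return -1
--         nxt = pop_smallest()
--         q2.append(cur + 2 * nxt)
--         count += 1
-- ===== Notes on version B (the rewrite author's own statement) =====
-- stated objective: alternative
-- what changed: Replaced the binary min-heap by the classic two-queue algorithm: sort once, then keep merged values in a plain FIFO; each minimum is found by an O(1) comparison of the two queue fronts (no priority queue), which is correct because merged values are produced in nondecreasing order (proved in the Lean file).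
-- crash fix: On a one-element list whose element is < K, A raises IndexError (heappop on an empty heap) while B returns -1 (the natural 'impossible' answer); on the empty list both raise IndexError. — e.g. on solution([1], 5): A raises IndexError, B returns -1
import Mathlib
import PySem

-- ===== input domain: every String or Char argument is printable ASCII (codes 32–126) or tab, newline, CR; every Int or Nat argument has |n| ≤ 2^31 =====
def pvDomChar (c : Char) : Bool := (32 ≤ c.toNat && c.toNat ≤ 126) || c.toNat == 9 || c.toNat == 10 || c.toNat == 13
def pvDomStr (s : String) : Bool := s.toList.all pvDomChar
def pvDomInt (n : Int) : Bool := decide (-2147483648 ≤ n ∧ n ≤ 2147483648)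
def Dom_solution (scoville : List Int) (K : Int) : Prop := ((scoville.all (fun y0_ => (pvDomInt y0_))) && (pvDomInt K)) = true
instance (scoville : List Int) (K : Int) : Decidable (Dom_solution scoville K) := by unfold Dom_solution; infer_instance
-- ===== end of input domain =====

-- B replaces A's binary min-heap by the two-queue algorithm (sort once; merged values go to a plain
-- FIFO; each minimum is the smaller of the two queue fronts). Equivalence is about the RETURN value
-- only (A heapifies its argument in place, B sorts a copy).

-- ===== PORT A =====
-- heapq is modelled at the value level: the heap holds a multiset, heappop removes a minimum,
-- heappush adds an element; on an empty heap heappop raises (excluded by Pre_solution; the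
-- model returns (0, []) there, outside the claim).
def heapPop : List Int → Int × List Int
  | [] => (0, [])
  | [x] => (x, [])
  | x :: y :: ys =>
    let (m, r) := heapPop (y :: ys)
    if x ≤ m then (x, y :: ys) else (m, x :: r)

def solutionLoop (K : Int) : Nat → List Int → Int → Int
  | 0, _, count => count
  | fuel + 1, scov, count =>
    let (curMin, s1) := heapPop scov
    if curMin < K then
      let (nxtMin, s2) := heapPop s1
      let s3 := (curMin + nxtMin * 2) :: s2
      if s3.length = 1 ∧ s3.headI < K then -1
      else solutionLoop K fuel s3 (count + 1)
    else count

def solution (scoville : List Int) (K : Int) : Int :=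
  solutionLoop K (scoville.length + 1) scoville 0

-- ===== PORT B =====
-- pop_smallest: the smaller of the fronts of the two queues; none = IndexError (both empty,
-- excluded by Pre_solution together with the states that can only follow from it).
def popSmallest : List Int → List Int → Option (Int × List Int × List Int)
  | q1, [] => match q1 with
    | [] => none
    | x :: xs => some (x, xs, ([] : List Int))
  | [], y :: ys => some (y, [], ys)
  | x :: xs, y :: ys => if x ≤ y then some (x, xs, y :: ys) else some (y, x :: xs, ys)

def altLoop (K : Int) : Nat → List Int → List Int → Int → Int
  | 0, _, _, count => count
  | fuel + 1, q1, q2, count =>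
    match popSmallest q1 q2 with
    | none => count          -- Python raises IndexError here (empty input, outside Pre_)
    | some (cur, q1', q2') =>
      if K ≤ cur then count
      else if q1' = [] ∧ q2' = [] then -1
      else match popSmallest q1' q2' with
        | none => count      -- unreachable: the previous branch ruled out two empty queues
        | some (nxt, q1'', q2'') =>
          altLoop K fuel q1'' (q2'' ++ [cur + 2 * nxt]) (count + 1)

def solution_alt (scoville : List Int) (K : Int) : Int :=
  altLoop K (scoville.length + 1) (PySem.List.sorted scoville (fun x => x) false) [] 0

-- ===== PRECONDITION & SPEC =====
-- Pre_ excludes exactly the inputs where Python A raises IndexError: the empty list, and a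
-- one-element list whose element is < K.
def Pre_solution (scoville : List Int) (K : Int) : Prop :=
  scoville ≠ [] ∧ ¬ (scoville.length = 1 ∧ scoville.headI < K)
instance (scoville : List Int) (K : Int) : Decidable (Pre_solution scoville K) := by
  unfold Pre_solution; infer_instance
def pvWitness_solution : List Int × Int := ([1, 2, 3, 9, 10, 12], 7)

-- On a one-element list with its element < K, A raises IndexError (heappop on an empty heap); B returns -1.
def Raises_solution (scoville : List Int) (K : Int) : Prop :=
  scoville.length = 1 ∧ scoville.headI < K
instance (scoville : List Int) (K : Int) : Decidable (Raises_solution scoville K) := by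
  unfold Raises_solution; infer_instance
def pvRaiseWitness_solution : List Int × Int := ([1], 5)
def pvRaiseWitnessOut_solution : Int := -1

def Spec_solution (scoville : List Int) (K : Int) (out : Int) : Prop := out = solution_alt scoville K
instance (scoville : List Int) (K : Int) (out : Int) : Decidable (Spec_solution scoville K out) := by unfold Spec_solution; infer_instance

-- ===== CLAIM (what is proved, stated in full; the proofs are below) =====
def Claim_equal_solution : Prop := ∀ (scoville : List Int) (K : Int), Dom_solution scoville K → Pre_solution scoville K → Spec_solution scoville K (solution scoville K)
def Claim_raises_solution : Prop := (∀ (scoville : List Int) (K : Int), Dom_solution scoville K → Raises_solution scoville K → ¬ Pre_solution scoville K) ∧ (Dom_solution (pvRaiseWitness_solution.1) (pvRaiseWitness_solution.2) ∧ Raises_solution (pvRaiseWitness_solution.1) (pvRaiseWitness_solution.2) ∧ solution_alt (pvRaiseWitness_solution.1) (pvRaiseWitness_solution.2) = pvRaiseWitnessOut_solution)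

-- ===== LEMMAS AND PROOFS =====

-- A-side 'heappop returns a minimum' facts (proof-only helpers).
theorem heapPop_perm (s : List Int) (h : s ≠ []) :
    List.Perm ((heapPop s).1 :: (heapPop s).2) s := by
  induction s with
  | nil => simp at h
  | cons x t ih =>
    cases t with
    | nil => simp [heapPop]
    | cons y ys =>
      have ihp := ih (by simp)
      cases h' : heapPop (y :: ys) with
      | mk m r =>
        rw [h'] at ihp
        simp only [heapPop, h']
        split_ifs with hx
        · exact List.Perm.refl _
        · exact ((List.Perm.swap x m r).trans (List.Perm.cons x ihp))

theorem heapPop_min (s : List Int) (h : s ≠ []) :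
    ∀ y ∈ s, (heapPop s).1 ≤ y := by
  induction s with
  | nil => simp at h
  | cons x t ih =>
    cases t with
    | nil => intro y hy; simp at hy; simp [heapPop, hy]
    | cons y ys =>
      have ihp := ih (by simp)
      cases h' : heapPop (y :: ys) with
      | mk m r =>
        rw [h'] at ihp
        intro z hz
        simp only [heapPop, h']
        split_ifs with hx
        · rcases (List.mem_cons).1 hz with hz | hz
          · simp [hz]
          · exact le_trans hx (ihp z hz)
        · rcases (List.mem_cons).1 hz with hz | hz
          · simpa [hz] using (not_le.1 hx).le
          · exact ihp z hz

-- canonical middle form: the same process on the fully sorted pool (proof-only)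
def insortB (x : Int) : List Int → List Int
  | [] => [x]
  | y :: ys => if x < y then x :: y :: ys else y :: insortB x ys

def midLoop (K : Int) : Nat → List Int → Int → Int
  | 0, _, count => count
  | fuel + 1, s, count =>
    match s with
    | [] => count
    | a :: rest =>
      if a < K then
        match rest with
        | [] => -1
        | b :: rest2 => midLoop K fuel (insortB (a + b * 2) rest2) (count + 1)
      else count

theorem insortB_perm (x : Int) (l : List Int) : List.Perm (insortB x l) (x :: l) := by
  induction l with
  | nil => simp [insortB]
  | cons y ys ih =>
    simp only [insortB]
    split_ifs with hx
    · exact List.Perm.refl _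
    · exact (List.Perm.cons y ih).trans (List.Perm.swap y x ys).symm

theorem insortB_pairwise (x : Int) (l : List Int) (h : l.Pairwise (· ≤ ·)) :
    (insortB x l).Pairwise (· ≤ ·) := by
  induction l with
  | nil => simp [insortB]
  | cons y ys ih =>
    rcases List.pairwise_cons.1 h with ⟨hy, hys⟩
    simp only [insortB]
    split_ifs with hx
    · exact List.pairwise_cons.2 ⟨by
        intro z hz
        rcases (List.mem_cons).1 hz with hz | hz
        · exact le_of_lt (hz ▸ hx)
        · exact le_trans (le_of_lt hx) (hy z hz), h⟩
    · refine List.pairwise_cons.2 ⟨?_, ih hys⟩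
      intro z hz
      rcases List.mem_cons.1 (((insortB_perm x ys).mem_iff).1 hz) with hz | hz
      · exact hz ▸ not_lt.1 hx
      · exact hy z hz

-- sorted s = m :: sorted r where (m, r) = heapPop s
theorem sorted_heapPop (s : List Int) (h : s ≠ []) :
    PySem.List.sorted s (fun x => x) false
      = (heapPop s).1 :: PySem.List.sorted (heapPop s).2 (fun x => x) false := by
  apply PySem.List.sorted_id_eq_of_perm_of_pairwise
  · exact (List.Perm.cons _ (PySem.List.sorted_perm _ _ _)).trans (heapPop_perm s h)
  · refine List.pairwise_cons.2 ⟨?_, PySem.List.sorted_pairwise _ _⟩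
    intro z hz
    have hzr : z ∈ (heapPop s).2 := ((PySem.List.sorted_perm _ _ _).mem_iff).1 hz
    have hzs : z ∈ s := ((heapPop_perm s h).mem_iff).1 (List.mem_cons_of_mem _ hzr)
    exact heapPop_min s h z hzs

-- sorted of insort: insortB into a sorted list is the sorted cons
theorem sorted_insortB (x : Int) (r : List Int) :
    PySem.List.sorted (x :: r) (fun y => y) false
      = insortB x (PySem.List.sorted r (fun y => y) false) := by
  apply PySem.List.sorted_id_eq_of_perm_of_pairwise
  · exact (insortB_perm x _).trans (List.Perm.cons x (PySem.List.sorted_perm _ _ _))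
  · exact insortB_pairwise x _ (PySem.List.sorted_pairwise _ _)

theorem loop_eq (K : Int) (fuel : Nat) :
    ∀ (s : List Int) (count : Int), s.length ≤ fuel →
      s ≠ [] → ¬ (s.length = 1 ∧ ∀ y ∈ s, y < K) →
      solutionLoop K fuel s count
        = midLoop K fuel (PySem.List.sorted s (fun x => x) false) count := by
  induction fuel with
  | zero =>
    intro s count hlen hne _
    interval_cases h : s.length
    · exact absurd (List.length_eq_zero_iff.1 h) hne
  | succ fuel ih =>
    intro s count hlen hne hgood
    cases h' : heapPop s with
    | mk m r =>
      have hperm : List.Perm (m :: r) s := by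
        have := heapPop_perm s hne; rw [h'] at this; exact this
      have hmin : ∀ y ∈ s, m ≤ y := by
        have := heapPop_min s hne; rw [h'] at this; exact this
      have hsorted : PySem.List.sorted s (fun x => x) false
          = m :: PySem.List.sorted r (fun x => x) false := by
        have := sorted_heapPop s hne; rw [h'] at this; exact this
      rw [hsorted]
      by_cases hm : m < K
      · -- r is nonempty: otherwise s is a one-element list all < K, excluded by hgood
        have hslen : s.length = r.length + 1 := (hperm.length_eq).symm
        have hr : r ≠ [] := by
          intro hr0
          apply hgood
          constructor
          · rw [hslen, hr0]; rfl
          · intro y hy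
            have : y ∈ (m : Int) :: r := hperm.mem_iff.2 hy
            rw [hr0] at this
            simp at this
            rw [this]; exact hm
        cases h2 : heapPop r with
        | mk n r2 =>
          have hperm2 : List.Perm (n :: r2) r := by
            have := heapPop_perm r hr; rw [h2] at this; exact this
          have hsorted2 : PySem.List.sorted r (fun x => x) false
              = n :: PySem.List.sorted r2 (fun x => x) false := by
            have := sorted_heapPop r hr; rw [h2] at this; exact this
          have hrlen : r.length = r2.length + 1 := (hperm2.length_eq).symm
          simp only [solutionLoop, h', h2, hm, if_pos, midLoop, hsorted2]
          rw [← sorted_insortB]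
          by_cases hc : ((m + n * 2) :: r2).length = 1 ∧ ((m + n * 2) :: r2).headI < K
          · -- A returns -1 now; the canonical loop reaches the one-element-below-K state next iteration
            rw [if_pos hc]
            obtain ⟨hc1, hc2⟩ := hc
            have hr2 : r2 = [] := by
              simpa using hc1
            subst hr2
            have hf : 1 ≤ fuel := by omega
            obtain ⟨f, rfl⟩ : ∃ f, fuel = f + 1 := ⟨fuel - 1, by omega⟩
            simp only [PySem.List.sorted, midLoop]
            simp at hc2
            simp [hc2, PySem.List.insertBy]
          · rw [if_neg hc]
            rw [ih]
            · simp only [List.length_cons]; omega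
            · simp
            · intro ⟨h1, h2⟩
              apply hc
              have hr2 : r2 = [] := by simpa using h1
              subst hr2
              exact ⟨rfl, h2 _ (by simp)⟩
      · simp only [solutionLoop, h', midLoop]
        rw [if_neg hm, if_neg hm]

-- ---- two-queue side: merge of the two sorted queues represents the pool ----
def mergeS : List Int → List Int → List Int
  | [], q2 => q2
  | x :: xs, [] => x :: xs
  | x :: xs, y :: ys => if x ≤ y then x :: mergeS xs (y :: ys) else y :: mergeS (x :: xs) ys
termination_by q1 q2 => q1.length + q2.length

theorem mergeS_nil_right (l : List Int) : mergeS l [] = l := by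
  cases l <;> simp [mergeS]

theorem mergeS_perm : ∀ (q1 q2 : List Int), List.Perm (mergeS q1 q2) (q1 ++ q2) := by
  intro q1
  induction q1 with
  | nil => intro q2; simp [mergeS]
  | cons x xs ih =>
    intro q2
    induction q2 with
    | nil => simp [mergeS]
    | cons y ys ih2 =>
      simp only [mergeS]
      split_ifs with h
      · exact List.Perm.cons x (ih (y :: ys))
      · exact (List.Perm.cons y ih2).trans (List.perm_middle).symm

theorem mergeS_sorted : ∀ (q1 q2 : List Int), q1.Pairwise (· ≤ ·) → q2.Pairwise (· ≤ ·) →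
    (mergeS q1 q2).Pairwise (· ≤ ·) := by
  intro q1
  induction q1 with
  | nil => intro q2 _ h2; simpa [mergeS] using h2
  | cons x xs ih =>
    intro q2 h1 h2
    induction q2 with
    | nil => simpa [mergeS] using h1
    | cons y ys ih2 =>
      rcases List.pairwise_cons.1 h1 with ⟨hx, hxs⟩
      rcases List.pairwise_cons.1 h2 with ⟨hy, hys⟩
      simp only [mergeS]
      split_ifs with h
      · refine List.pairwise_cons.2 ⟨?_, ih (y :: ys) hxs h2⟩
        intro z hz
        rcases List.mem_append.1 ((mergeS_perm xs (y :: ys)).mem_iff.1 hz) with hz | hz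
        · exact hx z hz
        · rcases List.mem_cons.1 hz with hz | hz
          · exact hz ▸ h
          · exact le_trans h (hy z hz)
      · refine List.pairwise_cons.2 ⟨?_, ih2 hys⟩
        intro z hz
        rcases List.mem_append.1 ((mergeS_perm (x :: xs) ys).mem_iff.1 hz) with hz | hz
        · rcases List.mem_cons.1 hz with hz | hz
          · exact hz ▸ (not_le.1 h).le
          · exact le_trans (not_le.1 h).le (hx z hz)
        · exact hy z hz

theorem popSmallest_spec (q1 q2 : List Int) :
    (popSmallest q1 q2 = none ∧ mergeS q1 q2 = []) ∨
    ∃ a q1' q2', popSmallest q1 q2 = some (a, q1', q2') ∧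
      mergeS q1 q2 = a :: mergeS q1' q2' ∧
      q1'.Sublist q1 ∧ q2'.Sublist q2 := by
  match q1, q2 with
  | [], [] => left; exact ⟨rfl, by simp [mergeS]⟩
  | x :: xs, [] =>
    right; exact ⟨x, xs, [], rfl, by rw [mergeS_nil_right, mergeS_nil_right], by simp, by simp⟩
  | [], y :: ys =>
    right; exact ⟨y, [], ys, rfl, by simp [mergeS], by simp, by simp⟩
  | x :: xs, y :: ys =>
    right
    by_cases h : x ≤ y
    · exact ⟨x, xs, y :: ys, by simp [popSmallest, h], by simp [mergeS, h], by simp, by simp⟩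
    · exact ⟨y, x :: xs, ys, by simp [popSmallest, h], by simp [mergeS, h], by simp, by simp⟩

-- the two-queue invariant: every queued merged value is ≤ x + 2y for the two smallest
-- remaining pool elements other than itself
def Winv (q1 q2 : List Int) : Prop :=
  ∀ e ∈ q2, ∀ x y t, (mergeS q1 q2).erase e = x :: y :: t → e ≤ x + 2 * y

theorem erase_cons_perm (a e : Int) (l : List Int) (h : e ∈ l) :
    List.Perm ((a :: l).erase e) (a :: l.erase e) := by
  rw [List.erase_cons]
  split_ifs with ha
  · have hae : a = e := by simpa using ha
    subst hae
    exact List.perm_cons_erase h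
  · exact List.Perm.refl _

theorem sorted_eq_of_perm {l₁ l₂ : List Int} (hp : List.Perm l₁ l₂)
    (h₁ : l₁.Pairwise (· ≤ ·)) (h₂ : l₂.Pairwise (· ≤ ·)) : l₁ = l₂ :=
  List.Perm.eq_of_pairwise (fun _ _ _ _ hab hba => le_antisymm hab hba) h₁ h₂ hp

theorem erase_sorted_eq (P : List Int) (e : Int) (l : List Int)
    (hp : List.Perm (P.erase e) l)
    (hP : P.Pairwise (· ≤ ·)) (hl : l.Pairwise (· ≤ ·)) : P.erase e = l :=
  sorted_eq_of_perm hp (List.Pairwise.sublist (List.erase_sublist ..) hP) hl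

-- the main simulation: the canonical sorted loop equals the two-queue loop
theorem mid_alt (K : Int) : ∀ (fuel : Nat) (q1 q2 : List Int) (count : Int),
    q1.Pairwise (· ≤ ·) → q2.Pairwise (· ≤ ·) → Winv q1 q2 →
    midLoop K fuel (mergeS q1 q2) count = altLoop K fuel q1 q2 count := by
  intro fuel
  induction fuel with
  | zero => intro q1 q2 count _ _ _; rfl
  | succ fuel ih =>
    intro q1 q2 count h1 h2 hW
    rcases popSmallest_spec q1 q2 with ⟨hpop, hnil⟩ | ⟨a, q1', q2', hpop, hmg, hs1, hs2⟩
    · simp only [midLoop, altLoop, hpop, hnil]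
    · have h1' : q1'.Pairwise (· ≤ ·) := List.Pairwise.sublist hs1 h1
      have h2' : q2'.Pairwise (· ≤ ·) := List.Pairwise.sublist hs2 h2
      simp only [midLoop, altLoop, hpop, hmg]
      by_cases ha : a < K
      · rw [if_pos ha, if_neg (not_le.2 ha)]
        by_cases hempty : q1' = [] ∧ q2' = []
        · obtain ⟨e1, e2⟩ := hempty
          subst e1; subst e2
          simp [mergeS]
        · rw [if_neg hempty]
          rcases popSmallest_spec q1' q2' with ⟨hpop2, hnil2⟩ | ⟨b, q1'', q2'', hpop2, hmg2, hs1', hs2'⟩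
          · exfalso
            have hp2 : List.Perm (q1' ++ q2') ([] : List Int) := by
              rw [← hnil2]; exact (mergeS_perm q1' q2').symm
            have h0 := hp2.eq_nil
            rw [List.append_eq_nil_iff] at h0
            exact hempty h0
          · have h1'' : q1''.Pairwise (· ≤ ·) := List.Pairwise.sublist hs1' h1'
            have h2'' : q2''.Pairwise (· ≤ ·) := List.Pairwise.sublist hs2' h2'
            simp only [hpop2, hmg2]
            -- the pool is a :: b :: R, sorted
            set R := mergeS q1'' q2'' with hR
            have hPsorted : (mergeS q1 q2).Pairwise (· ≤ ·) := mergeS_sorted q1 q2 h1 h2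
            rw [hmg, hmg2] at hPsorted
            have hab : a ≤ b := (List.pairwise_cons.1 hPsorted).1 b (by simp)
            have hbR : ∀ z ∈ R, b ≤ z :=
              (List.pairwise_cons.1 (List.pairwise_cons.1 hPsorted).2).1
            have haR : ∀ z ∈ R, a ≤ z := fun z hz =>
              (List.pairwise_cons.1 hPsorted).1 z (by simp [hz])
            have hRsorted : R.Pairwise (· ≤ ·) :=
              (List.pairwise_cons.1 (List.pairwise_cons.1 hPsorted).2).2
            set m : Int := a + 2 * b with hm
            -- every survivor in q2'' is ≤ m, by the invariant
            have hN1 : ∀ e ∈ q2'', e ≤ m := by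
              intro e he
              have heq2 : e ∈ q2 := hs2.subset (hs2'.subset he)
              have heR : e ∈ R := (mergeS_perm q1'' q2'').mem_iff.2 (by simp [he])
              apply hW e heq2 a b (R.erase e)
              rw [hmg, hmg2]
              refine erase_sorted_eq _ _ _ ?_ hPsorted ?_
              · refine ((erase_cons_perm a e _ (by simp [heR])).trans ?_)
                exact List.Perm.cons a (erase_cons_perm b e R heR)
              · refine List.pairwise_cons.2 ⟨?_, List.pairwise_cons.2
                  ⟨?_, List.Pairwise.sublist (List.erase_sublist ..) hRsorted⟩⟩
                · intro z hz
                  rcases List.mem_cons.1 hz with hz | hz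
                  · exact hz ▸ hab
                  · exact haR z ((List.erase_sublist ..).subset hz)
                · intro z hz
                  exact hbR z ((List.erase_sublist ..).subset hz)
            have hq2m : (q2'' ++ [m]).Pairwise (· ≤ ·) := by
              refine List.pairwise_append.2 ⟨h2'', by simp, ?_⟩
              intro e he z hz
              rw [List.mem_singleton.1 hz]
              exact hN1 e he
            have hval : a + b * 2 = m := by rw [hm]; ring
            rw [hval]
            -- the new pool equals insortB m R
            have hN3 : mergeS q1'' (q2'' ++ [m]) = insortB m R := by
              apply sorted_eq_of_perm
              · refine (mergeS_perm _ _).trans ?_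
                rw [← List.append_assoc]
                exact (List.perm_append_singleton m _).trans
                  ((List.Perm.cons m (mergeS_perm q1'' q2'').symm).trans (insortB_perm m R).symm)
              · exact mergeS_sorted _ _ h1'' hq2m
              · exact insortB_pairwise _ _ hRsorted
            -- the invariant is preserved
            have hWnew : Winv q1'' (q2'' ++ [m]) := by
              intro e he x y t ht
              rw [hN3] at ht
              rcases List.mem_append.1 he with he2 | hem0
              · -- a surviving merged value
                have heR : e ∈ R := (mergeS_perm q1'' q2'').mem_iff.2 (by simp [he2])
                have hbe : b ≤ e := hbR e heR
                have hem : e ≤ m := hN1 e he2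
                have hb0 : (0:Int) ≤ b := by rw [hm] at hem; linarith
                have hm0 : (0:Int) ≤ m := by rw [hm]; linarith
                have herase : (insortB m R).erase e = insortB m (R.erase e) := by
                  apply erase_sorted_eq
                  · exact ((insortB_perm m R).erase e).trans
                      ((erase_cons_perm m e R heR).trans (insortB_perm m (R.erase e)).symm)
                  · exact insortB_pairwise _ _ hRsorted
                  · exact insortB_pairwise _ _ (List.Pairwise.sublist (List.erase_sublist ..) hRsorted)
                rw [herase] at ht
                have hLb : ∀ z ∈ R.erase e, b ≤ z := fun z hz =>
                  hbR z ((List.erase_sublist ..).subset hz)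
                cases hL : R.erase e with
                | nil => rw [hL] at ht; simp [insortB] at ht
                | cons c t0 =>
                  have hc : b ≤ c := hLb c (by rw [hL]; simp)
                  rw [hL] at ht
                  simp only [insortB] at ht
                  split_ifs at ht with h1t
                  · -- the inserted value is the new minimum
                    simp only [List.cons.injEq] at ht
                    obtain ⟨hx, hy, -⟩ := ht
                    rw [← hx, ← hy]
                    linarith
                  · simp only [List.cons.injEq] at ht
                    obtain ⟨hx, hrest⟩ := ht
                    cases t0 with
                    | nil =>
                      simp only [insortB, List.cons.injEq] at hrest
                      obtain ⟨hy, -⟩ := hrest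
                      rw [← hx, ← hy]
                      linarith
                    | cons d t1 =>
                      have hd : b ≤ d := hLb d (by rw [hL]; simp)
                      simp only [insortB] at hrest
                      split_ifs at hrest with h2t
                      · simp only [List.cons.injEq] at hrest
                        obtain ⟨hy, -⟩ := hrest
                        rw [← hx, ← hy]
                        linarith
                      · simp only [List.cons.injEq] at hrest
                        obtain ⟨hy, -⟩ := hrest
                        rw [← hx, ← hy]
                        rw [hm] at hem
                        linarith
              · -- the freshly appended merged value
                have hem : e = m := by simpa using hem0
                rw [hem] at ht ⊢
                have herase : (insortB m R).erase m = R := by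
                  apply erase_sorted_eq
                  · have h' : List.Perm ((m :: R).erase m) R := by
                      rw [List.erase_cons_head]
                    exact ((insortB_perm m R).erase m).trans h'
                  · exact insortB_pairwise _ _ hRsorted
                  · exact hRsorted
                rw [herase] at ht
                have hx : b ≤ x := hbR x (by rw [ht]; simp)
                have hy : b ≤ y := hbR y (by rw [ht]; simp)
                rw [hm]
                linarith
            rw [← hN3]
            exact ih q1'' (q2'' ++ [m]) (count + 1) h1'' hq2m hWnew
      · rw [if_neg ha, if_pos (not_lt.1 ha)]

-- ===== VERDICT (by name: the statements are the Claim_ definitions above) =====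
theorem solution_spec : Claim_equal_solution := by
  intro scoville K _ hpre
  unfold Spec_solution solution solution_alt
  rw [loop_eq K (scoville.length + 1) scoville 0 (by omega) hpre.1 ?hg]
  case hg =>
    intro h
    obtain ⟨hl1, hl2⟩ := h
    apply hpre.2
    refine ⟨hl1, ?_⟩
    obtain ⟨x, rfl⟩ := List.length_eq_one_iff.1 hl1
    simpa using hl2 x (by simp)
  have hsorted : (PySem.List.sorted scoville (fun x => x) false).Pairwise (· ≤ ·) := by
    simpa using PySem.List.sorted_pairwise scoville (fun x : Int => x)
  have hma := mid_alt K (scoville.length + 1) (PySem.List.sorted scoville (fun x => x) false)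
    [] 0 hsorted (by simp) (by intro e he; simp at he)
  rw [mergeS_nil_right] at hma
  exact hma

@[simp] theorem solution_raises : Claim_raises_solution := by
  unfold Claim_raises_solution
  exact ⟨by intro s K _ hr hp; exact hp.2 hr, by decide⟩
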